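-- pv_equiv track=rewrite | github.com/dage8044/board | 백준 풀이/28064.py | is_connectable
-- ===== SOURCE A (Python) =====
-- def is_connectable(a, b, is_swapped):
--     max_step = min(len(a), len(b))
--     for cnt in range(1, max_step + 1):
--         same = True
--         for i in range(cnt):
--             if a[len(a) - cnt + i] != b[i]:
--                 same = False
--                 break
--         if same:
--             return True
--
--     if is_swapped:
--         return False
--     else:
--         return is_connectable(b, a, True)
-- ===== SOURCE B (Python) =====
-- def is_connectable(a, b, is_swapped):
--     def overlap(x, y):
--         # NFA-style single pass over x: 'active' holds every length l such that
--         # the last l chars of the processed prefix of x equal y[:l].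
--         active = set()
--         for ch in x:
--             nxt = {l + 1 for l in active if l < len(y) and y[l] == ch}
--             if y and y[0] == ch:
--                 nxt.add(1)
--             active = nxt
--         return bool(active)
--     return overlap(a, b) or (not is_swapped and overlap(b, a))
-- ===== Notes on version B (the rewrite author's own statement) =====
-- stated objective: alternative
-- what changed: A restarts a fresh character-by-character comparison for every candidate overlap length (nested loops, plus a recursive self-call for the swapped direction); B makes one left-to-right pass per direction, maintaining the set of all currently live suffix-prefix match lengths (an NFA-state simulation) and checking it for non-emptiness at the end.
import Mathlib
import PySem

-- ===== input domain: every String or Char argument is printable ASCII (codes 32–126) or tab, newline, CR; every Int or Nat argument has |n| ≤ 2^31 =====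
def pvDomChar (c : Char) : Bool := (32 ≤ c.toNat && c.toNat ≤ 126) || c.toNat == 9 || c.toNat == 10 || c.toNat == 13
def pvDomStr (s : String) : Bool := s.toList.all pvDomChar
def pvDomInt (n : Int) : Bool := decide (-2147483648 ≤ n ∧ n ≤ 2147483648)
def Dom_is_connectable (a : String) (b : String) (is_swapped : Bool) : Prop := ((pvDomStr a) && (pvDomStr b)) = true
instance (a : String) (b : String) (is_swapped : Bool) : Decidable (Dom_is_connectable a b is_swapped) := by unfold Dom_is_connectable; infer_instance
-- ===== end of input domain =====

-- B replaces A's restart-per-length nested scans (plus a self-call for the swapped order) by a single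
-- left-to-right pass per direction that maintains the set of all live suffix-prefix match lengths
-- (an NFA-state simulation); objective: alternative algorithm, no speed claim.

-- ===== PORT A =====
-- inner 'for i in range(cnt)' loop of A, iterating over the index list; returns the final 'same'
-- (indices len(a)-cnt+i and i are always in range since cnt ≤ min(len a, len b), so getD is exact)
def pvInnerGo (x y : List Char) (cnt : Nat) : List Nat → Bool
  | [] => true
  | i :: rest =>
      if x.getD (x.length - cnt + i) ' ' ≠ y.getD i ' ' then false
      else pvInnerGo x y cnt rest

def pvInnerA (x y : List Char) (cnt : Nat) : Bool :=
  pvInnerGo x y cnt (List.range cnt)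

-- outer 'for cnt in range(1, max_step+1)' loop of A; true iff some cnt returns early
def pvOuterGo (x y : List Char) : List Nat → Bool
  | [] => false
  | c :: rest => if pvInnerA x y c then true else pvOuterGo x y rest

def pvOuterA (x y : List Char) (maxStep : Nat) : Bool :=
  pvOuterGo x y (List.range' 1 maxStep)

-- A's self-recursion (depth ≤ 1: the recursive call passes is_swapped = True), with a fuel
-- parameter only to make the recursion structural; fuel 2 always suffices
def pvConnA (fuel : Nat) (a b : String) (is_swapped : Bool) : Bool :=
  match fuel with
  | 0 => false
  | fuel + 1 =>
      if pvOuterA a.toList b.toList (min a.toList.length b.toList.length) then true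
      else if is_swapped then false
      else pvConnA fuel b a true

def is_connectable (a : String) (b : String) (is_swapped : Bool) : Bool :=
  pvConnA 2 a b is_swapped

-- ===== PORT B =====
-- one step of B's scan: from the set of live match lengths after prefix p, to the set after p++[c]
def pvStepB (y : List Char) (active : PySem.Set Nat) (c : Char) : PySem.Set Nat :=
  let nxt := PySem.Set.ofList
    ((active.filter (fun l => decide (l < y.length) && (y.getD l ' ' == c))).map (fun l => l + 1))
  if !y.isEmpty && (y.getD 0 ' ' == c) then PySem.Set.add nxt 1 else nxt

-- B's helper overlap(x, y): single pass over x
def pvOverlapB (x y : List Char) : Bool :=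
  !(x.foldl (pvStepB y) PySem.Set.empty).isEmpty

def is_connectable_alt (a : String) (b : String) (is_swapped : Bool) : Bool :=
  pvOverlapB a.toList b.toList || (!is_swapped && pvOverlapB b.toList a.toList)

-- ===== PRECONDITION & SPEC =====
def Spec_is_connectable (a : String) (b : String) (is_swapped : Bool) (out : Bool) : Prop := out = is_connectable_alt a b is_swapped
instance (a : String) (b : String) (is_swapped : Bool) (out : Bool) : Decidable (Spec_is_connectable a b is_swapped out) := by unfold Spec_is_connectable; infer_instance

-- ===== CLAIM (what is proved, stated in full; the proofs are below) =====
def Claim_equal_is_connectable : Prop := ∀ (a : String) (b : String) (is_swapped : Bool), Dom_is_connectable a b is_swapped → Spec_is_connectable a b is_swapped (is_connectable a b is_swapped)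

-- ===== LEMMAS AND PROOFS =====

-- the common specification: some nonempty suffix of x is a prefix of y
def pvOv (x y : List Char) : Prop :=
  ∃ c, 1 ≤ c ∧ c ≤ x.length ∧ c ≤ y.length ∧ x.drop (x.length - c) = y.take c

-- A's inner loop checks the characters pointwise
theorem pvInnerGo_iff (x y : List Char) (cnt : Nat) (js : List Nat) :
    pvInnerGo x y cnt js = true ↔
      ∀ j ∈ js, x.getD (x.length - cnt + j) ' ' = y.getD j ' ' := by
  induction js with
  | nil => simp [pvInnerGo]
  | cons i rest ih =>
      simp only [pvInnerGo]
      split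
      · next hne =>
          simp only [Bool.false_eq_true, false_iff]
          intro h
          exact hne (h i (List.mem_cons_self ..))
      · next heq =>
          rw [ih]
          constructor
          · intro h j hj
            rcases List.mem_cons.mp hj with rfl | hj'
            · exact not_not.mp heq
            · exact h j hj'
          · intro h j hj
            exact h j (List.mem_cons_of_mem _ hj)

theorem pvInnerA_iff (x y : List Char) (cnt : Nat) :
    pvInnerA x y cnt = true ↔
      ∀ j, j < cnt → x.getD (x.length - cnt + j) ' ' = y.getD j ' ' := by
  rw [pvInnerA, pvInnerGo_iff]
  simp [List.mem_range]

-- pointwise character equality = slice equality (for in-range cnt)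
theorem pv_pointwise_iff (x y : List Char) (cnt : Nat)
    (hx : cnt ≤ x.length) (hy : cnt ≤ y.length) :
    (∀ j, 0 ≤ j → j < cnt → x.getD (x.length - cnt + j) ' ' = y.getD j ' ') ↔
      x.drop (x.length - cnt) = y.take cnt := by
  constructor
  · intro h
    apply List.ext_getElem
    · simp [hy]; omega
    · intro j h1 h2
      have hj : j < cnt := by simp at h1; omega
      have hxj : x.length - cnt + j < x.length := by omega
      have hyj : j < y.length := by omega
      have := h j (Nat.zero_le j) hj
      rw [List.getD_eq_getElem x ' ' hxj, List.getD_eq_getElem y ' ' hyj] at this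
      simpa [List.getElem_drop, List.getElem_take] using this
  · intro h j _ hj
    have hxj : x.length - cnt + j < x.length := by omega
    have hyj : j < y.length := by omega
    rw [List.getD_eq_getElem x ' ' hxj, List.getD_eq_getElem y ' ' hyj]
    have h1 : j < (x.drop (x.length - cnt)).length := by simp; omega
    have := List.getElem_of_eq h h1
    simpa [List.getElem_drop, List.getElem_take] using this

-- A's outer loop searches the candidate lengths in order
theorem pvOuterGo_iff (x y : List Char) (cs : List Nat) :
    pvOuterGo x y cs = true ↔ ∃ c ∈ cs, pvInnerA x y c = true := by
  induction cs with
  | nil => simp [pvOuterGo]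
  | cons c rest ih =>
      simp only [pvOuterGo]
      split
      · next h =>
          simp only [true_iff]
          exact ⟨c, List.mem_cons_self .., h⟩
      · next h =>
          rw [ih]
          constructor
          · rintro ⟨c', hc', h'⟩
            exact ⟨c', List.mem_cons_of_mem _ hc', h'⟩
          · rintro ⟨c', hc', h'⟩
            rcases List.mem_cons.mp hc' with rfl | hc''
            · exact absurd h' h
            · exact ⟨c', hc'', h'⟩

theorem pvOuterA_ov (x y : List Char) :
    pvOuterA x y (min x.length y.length) = true ↔ pvOv x y := by
  rw [pvOuterA, pvOuterGo_iff]
  constructor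
  · rintro ⟨c, hc, h3⟩
    rw [List.mem_range'_1] at hc
    have hx : c ≤ x.length := by omega
    have hy : c ≤ y.length := by omega
    refine ⟨c, hc.1, hx, hy, ?_⟩
    exact (pv_pointwise_iff x y c hx hy).mp
      (fun j _ hj => (pvInnerA_iff x y c).mp h3 j hj)
  · rintro ⟨c, h1, hx, hy, heq⟩
    refine ⟨c, ?_, ?_⟩
    · rw [List.mem_range'_1]; omega
    · rw [pvInnerA_iff]
      intro j hj
      exact (pv_pointwise_iff x y c hx hy).mpr heq j (Nat.zero_le j) hj

-- dropping to the last l chars of p++[c], compared with take l y, splits off the last character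
theorem pv_drop_snoc (p y : List Char) (c : Char) (l : Nat)
    (h1 : 1 ≤ l) (h2 : l ≤ p.length + 1) (h3 : l ≤ y.length) :
    ((p ++ [c]).drop (p.length + 1 - l) = y.take l) ↔
      (p.drop (p.length - (l - 1)) = y.take (l - 1) ∧ y.getD (l - 1) ' ' = c) := by
  have hd : p.length + 1 - l ≤ p.length := by omega
  have hyl : l - 1 < y.length := by omega
  rw [List.drop_append_of_le_length hd]
  have heq : p.length + 1 - l = p.length - (l - 1) := by omega
  rw [heq]
  have hts : y.take l = y.take (l - 1) ++ [y[l-1]] := by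
    conv_lhs => rw [show l = (l - 1) + 1 by omega]
    rw [List.take_add_one, List.getElem?_eq_getElem hyl]
    rfl
  rw [hts]
  constructor
  · intro h
    have hlen : (p.drop (p.length - (l - 1))).length = (y.take (l - 1)).length := by
      simp; omega
    obtain ⟨ha, hb⟩ := List.append_inj h hlen
    refine ⟨ha, ?_⟩
    rw [List.getD_eq_getElem y ' ' hyl]
    exact (List.singleton_inj.mp hb).symm
  · rintro ⟨ha, hb⟩
    rw [ha]
    congr 1
    rw [List.getD_eq_getElem y ' ' hyl] at hb
    rw [hb]

-- membership after one step of B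
theorem pvStepB_mem (y : List Char) (S : PySem.Set Nat) (c : Char) (l : Nat) :
    l ∈ pvStepB y S c ↔
      ((l = 1 ∧ y ≠ [] ∧ y.getD 0 ' ' = c) ∨
       (∃ k, k ∈ S ∧ k < y.length ∧ y.getD k ' ' = c ∧ l = k + 1)) := by
  unfold pvStepB
  split
  · next hcond =>
      simp only [Bool.and_eq_true, Bool.not_eq_true', List.isEmpty_eq_false_iff, beq_iff_eq] at hcond
      simp only [PySem.Set.mem_add, PySem.Set.mem_ofList, List.mem_map, List.mem_filter,
        Bool.and_eq_true, decide_eq_true_eq, beq_iff_eq]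
      constructor
      · rintro (⟨k, ⟨hk, hlen, hc⟩, rfl⟩ | rfl)
        · exact Or.inr ⟨k, hk, hlen, hc, rfl⟩
        · exact Or.inl ⟨rfl, hcond.1, hcond.2⟩
      · rintro (⟨rfl, _, _⟩ | ⟨k, hk, hlen, hc, rfl⟩)
        · exact Or.inr rfl
        · exact Or.inl ⟨k, ⟨hk, hlen, hc⟩, rfl⟩
  · next hcond =>
      simp only [Bool.and_eq_true, Bool.not_eq_true', List.isEmpty_eq_false_iff, beq_iff_eq,
        not_and] at hcond
      simp only [PySem.Set.mem_ofList, List.mem_map, List.mem_filter,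
        Bool.and_eq_true, decide_eq_true_eq, beq_iff_eq]
      constructor
      · rintro ⟨k, ⟨hk, hlen, hc⟩, rfl⟩
        exact Or.inr ⟨k, hk, hlen, hc, rfl⟩
      · rintro (⟨rfl, hne, hc⟩ | ⟨k, hk, hlen, hc, rfl⟩)
        · exact absurd hc (hcond hne)
        · exact ⟨k, ⟨hk, hlen, hc⟩, rfl⟩

-- B's loop invariant: after processing p, the active set holds exactly the live match lengths
theorem pvFoldB_mem (y p : List Char) (l : Nat) :
    l ∈ p.foldl (pvStepB y) PySem.Set.empty ↔
      (1 ≤ l ∧ l ≤ p.length ∧ l ≤ y.length ∧ p.drop (p.length - l) = y.take l) := by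
  induction p using List.reverseRecOn generalizing l with
  | nil =>
      simp [PySem.Set.empty]
      omega
  | append_singleton p c ih =>
      rw [List.foldl_append, List.foldl_cons, List.foldl_nil, pvStepB_mem]
      simp only [ih, List.length_append, List.length_singleton]
      constructor
      · rintro (⟨rfl, hne, hc⟩ | ⟨k, ⟨hk1, hk2, hk3, hkeq⟩, hklen, hc, rfl⟩)
        · have hy : 1 ≤ y.length := by
            cases y with
            | nil => exact absurd rfl hne
            | cons _ _ => simp
          refine ⟨le_rfl, by omega, hy, ?_⟩
          rw [(pv_drop_snoc p y c 1 le_rfl (by omega) hy)]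
          simpa using hc
        · refine ⟨by omega, by omega, by omega, ?_⟩
          rw [(pv_drop_snoc p y c (k+1) (by omega) (by omega) (by omega))]
          simpa using ⟨hkeq, hc⟩
      · rintro ⟨h1, h2, h3, heq⟩
        rw [(pv_drop_snoc p y c l h1 h2 h3)] at heq
        rcases Nat.lt_or_ge l 2 with hl | hl
        · have : l = 1 := by omega
          subst this
          left
          refine ⟨rfl, ?_, by simpa using heq.2⟩
          intro hnil
          subst hnil
          simp at h3
        · right
          refine ⟨l - 1, ⟨by omega, ?_, by omega, heq.1⟩, by omega, heq.2, by omega⟩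
          by_contra hgt
          push Not at hgt
          have : (p.drop (p.length - (l-1))).length = (y.take (l-1)).length := by rw [heq.1]
          simp at this
          omega

theorem pvOverlapB_ov (x y : List Char) : pvOverlapB x y = true ↔ pvOv x y := by
  unfold pvOverlapB pvOv
  rw [Bool.not_eq_true', List.isEmpty_eq_false_iff, ← List.isEmpty_eq_false_iff,
    List.isEmpty_eq_false_iff_exists_mem]
  constructor
  · rintro ⟨l, hl⟩
    exact ⟨l, (pvFoldB_mem y x l).mp hl⟩
  · rintro ⟨l, hl⟩
    exact ⟨l, (pvFoldB_mem y x l).mpr hl⟩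

theorem pvOuter_eq_overlap (x y : List Char) :
    pvOuterA x y (min x.length y.length) = pvOverlapB x y := by
  rw [Bool.eq_iff_iff]
  exact (pvOuterA_ov x y).trans (pvOverlapB_ov x y).symm

-- ===== VERDICT (by name: the statement is the Claim_ definition above) =====
theorem is_connectable_spec : Claim_equal_is_connectable := by
  intro a b is_swapped _
  unfold Spec_is_connectable
  cases is_swapped with
  | true =>
      simp only [is_connectable, pvConnA, is_connectable_alt, pvOuter_eq_overlap]
      cases h : pvOverlapB a.toList b.toList <;> simp
  | false =>
      simp only [is_connectable, pvConnA, is_connectable_alt, pvOuter_eq_overlap]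
      cases h1 : pvOverlapB a.toList b.toList <;>
        cases h2 : pvOverlapB b.toList a.toList <;> simp
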